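-- pv_equiv track=rewrite | github.com/kuznia-rdzeni/coreblocks | test/transactron/utils/test_amaranth_ext.py | get_expected_multi
-- ===== SOURCE A (Python) =====
-- def get_expected_multi(input_width, output_count, input, *args):
--     places = []
--     for i in range(input_width):
--         if input % 2:
--             places.append(i)
--         input //= 2
--     places += [None] * output_count
--     return places
-- ===== SOURCE B (Python) =====
-- def get_expected_multi(input_width, output_count, input, *args):
--     # mask to the low input_width bits, render them as a binary string once,
--     # and read the set-bit positions off the reversed digit string
--     masked = input & ((1 << input_width) - 1)
--     bits = bin(masked)[2:]
--     places = [i for i, c in enumerate(reversed(bits)) if c == "1"]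
--     places += [None] * output_count
--     return places
-- ===== Notes on version B (the rewrite author's own statement) =====
-- stated objective: faster
-- what changed: A scans the bit positions one by one with input%2 and input//=2 in a Python-level loop; B masks the input to its low input_width bits once, formats it as a binary string with bin(), and reads the set-bit positions off the reversed digit string with one enumerate comprehension.
-- outside the precondition, e.g. on get_expected_multi(-1, 1, 5): A returns [None], B raises ValueError
import Mathlib
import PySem

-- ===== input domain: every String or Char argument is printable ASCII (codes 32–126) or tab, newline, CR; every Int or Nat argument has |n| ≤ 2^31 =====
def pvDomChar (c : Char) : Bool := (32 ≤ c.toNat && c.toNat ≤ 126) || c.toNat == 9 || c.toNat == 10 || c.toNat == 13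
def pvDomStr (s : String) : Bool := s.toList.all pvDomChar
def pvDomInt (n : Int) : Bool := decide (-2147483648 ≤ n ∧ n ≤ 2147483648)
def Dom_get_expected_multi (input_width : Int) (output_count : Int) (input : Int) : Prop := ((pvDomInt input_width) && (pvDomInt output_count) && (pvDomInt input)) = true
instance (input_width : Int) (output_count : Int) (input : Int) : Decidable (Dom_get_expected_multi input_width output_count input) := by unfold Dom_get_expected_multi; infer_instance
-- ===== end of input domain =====

-- B masks the input to its low input_width bits once and reads the set-bit positions off the
-- reversed binary string bin(masked)[2:], replacing A's per-position %2 / //=2 loop; the timing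
-- run measured B faster on the generated inputs.

-- ===== PORT A =====
-- literal port of A: loop i over range(input_width), test input % 2, append i, input //= 2,
-- then extend with [None] * output_count
def get_expected_multi (input_width : Int) (output_count : Int) (input : Int) : List (Option Int) :=
  let s := (PySem.List.pyRange 0 input_width 1).foldl
    (fun (s : List (Option Int) × Int) i =>
      ((if PySem.Int.mod s.2 2 ≠ 0 then s.1 ++ [some i] else s.1), PySem.Int.floordiv s.2 2))
    ([], input)
  s.1 ++ PySem.List.pyRepeat [none] output_count

-- ===== PORT B =====
-- port of Source B: mask, bin(masked)[2:], then the comprehension over enumerate(reversed(bits));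
-- the string is handled on List Char via the PySem bridge (pyBin/toList, slice, enumerate)
def get_expected_multi_alt (input_width : Int) (output_count : Int) (input : Int) : List (Option Int) :=
  -- input & ((1 << input_width) - 1); Pre_ gives 0 ≤ input_width, so .toNat is exact
  let masked := PySem.Int.band input ((1 <<< input_width.toNat : Int) - 1)
  let bits := PySem.List.slice (PySem.Int.pyBin masked).toList (some (2:Int)) none
  let places := (PySem.List.enumerate bits.reverse 0).filterMap
    (fun p => if p.2 = '1' then some (some p.1) else none)
  places ++ PySem.List.pyRepeat [none] output_count

-- ===== PRECONDITION & SPEC =====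
-- Pre_ excludes negative input_width (outside the natural hardware-width domain): A returns
-- [None]*output_count there, while B's shift `1 << input_width` raises ValueError.
def Pre_get_expected_multi (input_width : Int) (output_count : Int) (input : Int) : Prop :=
  0 ≤ input_width
instance (input_width : Int) (output_count : Int) (input : Int) : Decidable (Pre_get_expected_multi input_width output_count input) := by unfold Pre_get_expected_multi; infer_instance
def pvWitness_get_expected_multi : Int × Int × Int := (5, 2, 11)

def Spec_get_expected_multi (input_width : Int) (output_count : Int) (input : Int) (out : List (Option Int)) : Prop := out = get_expected_multi_alt input_width output_count input
instance (input_width : Int) (output_count : Int) (input : Int) (out : List (Option Int)) : Decidable (Spec_get_expected_multi input_width output_count input out) := by unfold Spec_get_expected_multi; infer_instance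

-- ===== CLAIM (what is proved, stated in full; the proofs are below) =====
def Claim_equal_get_expected_multi : Prop := ∀ (input_width : Int) (output_count : Int) (input : Int), Dom_get_expected_multi input_width output_count input → Pre_get_expected_multi input_width output_count input → Spec_get_expected_multi input_width output_count input (get_expected_multi input_width output_count input)

-- ===== LEMMAS AND PROOFS =====

-- canonical list of the set-bit positions of a natural number, in increasing order
def pvBitsOf (n : Nat) : List Nat :=
  if h : n = 0 then []
  else (if n % 2 = 1 then [0] else []) ++ (pvBitsOf (n / 2)).map (· + 1)
decreasing_by exact Nat.div_lt_self (Nat.pos_of_ne_zero h) (by omega)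

theorem pvBitsOf_eq (n : Nat) :
    pvBitsOf n = (if n % 2 = 1 then [0] else []) ++ (pvBitsOf (n / 2)).map (· + 1) := by
  rw [pvBitsOf]
  split
  · subst ‹n = 0›; rw [pvBitsOf]; simp
  · rfl

-- ---- Nat.toDigits base 2: fuel irrelevance, accumulator append, and the recursion ----
theorem pv_tdc_succ (b f n : Nat) (ds : List Char) :
    Nat.toDigitsCore b (f+1) n ds =
      if n / b = 0 then (n % b).digitChar :: ds
      else Nat.toDigitsCore b f (n / b) ((n % b).digitChar :: ds) := rfl

theorem pv_tdc_fuel (n : Nat) : ∀ (f f' : Nat) (ds : List Char), n < f → n < f' →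
    Nat.toDigitsCore 2 f n ds = Nat.toDigitsCore 2 f' n ds := by
  induction n using Nat.strong_induction_on with
  | _ n ih =>
    intro f f' ds hf hf'
    obtain ⟨f0, rfl⟩ : ∃ a, f = a + 1 := ⟨f - 1, by omega⟩
    obtain ⟨f0', rfl⟩ : ∃ a, f' = a + 1 := ⟨f' - 1, by omega⟩
    rw [pv_tdc_succ, pv_tdc_succ]
    by_cases h : n / 2 = 0
    · rw [if_pos h, if_pos h]
    · rw [if_neg h, if_neg h]
      exact ih (n/2) (by omega) f0 f0' _ (by omega) (by omega)

theorem pv_tdc_acc (n : Nat) : ∀ (f : Nat) (ds : List Char), n < f →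
    Nat.toDigitsCore 2 f n ds = Nat.toDigitsCore 2 f n [] ++ ds := by
  induction n using Nat.strong_induction_on with
  | _ n ih =>
    intro f ds hf
    obtain ⟨f0, rfl⟩ : ∃ a, f = a + 1 := ⟨f - 1, by omega⟩
    rw [pv_tdc_succ, pv_tdc_succ]
    by_cases h : n / 2 = 0
    · rw [if_pos h, if_pos h]; simp
    · rw [if_neg h, if_neg h]
      rw [ih (n/2) (by omega) f0 _ (by omega), ih (n/2) (by omega) f0 [(n % 2).digitChar] (by omega)]
      simp

theorem pv_toDigits_two_rec (n : Nat) (h : 2 ≤ n) :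
    Nat.toDigits 2 n = Nat.toDigits 2 (n/2) ++ [(n % 2).digitChar] := by
  rw [Nat.toDigits, Nat.toDigits, pv_tdc_succ]
  rw [if_neg (by omega)]
  rw [pv_tdc_acc (n/2) n _ (by omega), pv_tdc_fuel (n/2) n (n/2+1) [] (by omega) (by omega)]

-- ---- the comprehension [i for i, c in enumerate(cs) if c == '1'] ----
def pvEF (cs : List Char) (s : Int) : List (Option Int) :=
  (PySem.List.enumerate cs s).filterMap (fun p => if p.2 = '1' then some (some p.1) else none)

theorem pvEF_shift (cs : List Char) : ∀ (s t : Int),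
    pvEF cs (s + t) = (pvEF cs s).map (Option.map (· + t)) := by
  induction cs with
  | nil => intro s t; simp [pvEF, PySem.List.enumerate_nil]
  | cons c cs ih =>
    intro s t
    simp only [pvEF, PySem.List.enumerate_cons, List.filterMap_cons] at *
    have harg : s + t + 1 = (s + 1) + t := by ring
    by_cases hc : c = '1'
    · simp only [if_pos hc, harg, ih (s+1) t, List.map_cons, Option.map_some]
    · simp only [if_neg hc, harg, ih (s+1) t]

-- B's comprehension over the reversed binary digits yields exactly the set-bit positions
theorem pvEF_toDigits (n : Nat) :
    pvEF (Nat.toDigits 2 n).reverse 0 = (pvBitsOf n).map (fun j => some ((j : Nat) : Int)) := by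
  induction n using Nat.strong_induction_on with
  | _ n ih =>
    rcases (by omega : n = 0 ∨ n = 1 ∨ 2 ≤ n) with rfl | rfl | h2
    · have hd : Nat.toDigits 2 0 = ['0'] := rfl
      rw [hd]
      simp [pvEF, PySem.List.enumerate_cons, PySem.List.enumerate_nil, pvBitsOf]
    · have hd : Nat.toDigits 2 1 = ['1'] := rfl
      rw [hd, pvBitsOf_eq 1]
      simp [pvEF, PySem.List.enumerate_cons, PySem.List.enumerate_nil, pvBitsOf]
    · rw [pv_toDigits_two_rec n h2]
      rw [List.reverse_append]
      simp only [List.reverse_singleton, List.singleton_append]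
      rw [pvEF, PySem.List.enumerate_cons, List.filterMap_cons]
      have hshift : pvEF (Nat.toDigits 2 (n/2)).reverse (0 + 1)
          = (pvEF (Nat.toDigits 2 (n/2)).reverse 0).map (Option.map (· + 1)) :=
        pvEF_shift _ 0 1
      rw [pvBitsOf_eq n]
      by_cases hodd : n % 2 = 1
      · have hdig : (n % 2).digitChar = '1' := by rw [hodd]; rfl
        rw [hdig, if_pos rfl, if_pos hodd]
        show some 0 :: pvEF (Nat.toDigits 2 (n/2)).reverse (0 + 1) = _
        rw [hshift, ih (n/2) (by omega)]
        simp only [List.map_append, List.map_cons, List.map_nil, List.map_map]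
        congr 1
      · have hdig : (n % 2).digitChar = '0' := by
          have : n % 2 = 0 := by omega
          rw [this]; rfl
        rw [hdig, if_neg (by decide), if_neg hodd]
        show pvEF (Nat.toDigits 2 (n/2)).reverse (0 + 1) = _
        rw [hshift, ih (n/2) (by omega)]
        simp only [List.nil_append, List.map_map]
        apply List.map_congr_left
        intro j _
        simp

-- masking with 2^k - 1 is reduction mod 2^k, also for negative inputs (Python two's complement)
theorem pv_band_mask (a : Int) (k : Nat) :
    PySem.Int.band a ((1 <<< k : Int) - 1) = a % (2^k) := by
  have hpow : (1:Nat) ≤ 2^k := Nat.one_le_two_pow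
  have hcast : ((2:Nat)^k : Int) = (2:Int)^k := by push_cast; ring
  have hsh : (1 <<< k : Int) = 2^k := by
    have h : (1 <<< k : Nat) = 2^k := by simp [Nat.shiftLeft_eq]
    push_cast [h]
    exact hcast
  rw [hsh]
  have hb : (0:Int) ≤ 2^k - 1 := by
    have : (0:Int) < 2^k := by positivity
    omega
  have h1 : ((2:Int)^k - 1).toNat = 2^k - 1 := by omega
  rcases (by omega : 0 ≤ a ∨ a < 0) with ha | ha
  · rw [PySem.Int.band_of_nonneg ha hb, h1, Nat.and_two_pow_sub_one_eq_mod]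
    have h4 : a = ((a.toNat) : Int) := by omega
    rw [h4, Int.natCast_mod]
    push_cast
    rfl
  · have hba : ¬ (0 ≤ a) := by omega
    rw [PySem.Int.band]
    simp only [hba, if_false, hb, if_true]
    rw [h1, Nat.and_comm, Nat.and_two_pow_sub_one_eq_mod]
    set m : Nat := (-a - 1).toNat with hm
    set q : Nat := m / 2^k with hq
    set r : Nat := m % 2^k with hr
    have hrq : m = 2^k * q + r ∧ r < 2^k :=
      ⟨(Nat.div_add_mod m (2^k)).symm, Nat.mod_lt _ (by positivity)⟩
    have hmi : (m:Int) = (2:Int)^k * q + r := by exact_mod_cast hrq.1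
    have ha2 : a = -((m:Int)+1) := by omega
    have ha' : a = ((2:Int)^k - 1 - (r:Int)) + 2^k * (-(q:Int)-1) := by rw [ha2, hmi]; ring
    rw [ha', Int.add_mul_emod_self_left]
    have hri : (r:Int) < 2^k := by exact_mod_cast hrq.2
    rw [Int.emod_eq_of_lt (by omega) (by omega)]
    omega

-- ---- A side: the mod/floordiv loop over range produces the same set-bit positions ----
theorem pvALoop (k : Nat) : ∀ (i inp : Int) (acc : List (Option Int)),
    ((PySem.List.pyRange i (i + (k : Nat)) 1).foldl
      (fun (s : List (Option Int) × Int) j =>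
        ((if PySem.Int.mod s.2 2 ≠ 0 then s.1 ++ [some j] else s.1), PySem.Int.floordiv s.2 2))
      (acc, inp)).1
    = acc ++ (pvBitsOf ((inp % (2^k)).toNat)).map (fun j => some (i + (j : Nat))) := by
  induction k with
  | zero =>
    intro i inp acc
    rw [PySem.List.pyRange_one_eq_nil (by omega)]
    simp [pvBitsOf]
  | succ k ihk =>
    intro i inp acc
    have hlt : i < i + ((k+1 : Nat) : Int) := by push_cast; omega
    rw [PySem.List.pyRange_one_cons hlt]
    simp only [List.foldl_cons]
    have hrange : PySem.List.pyRange (i+1) (i + ((k+1 : Nat) : Int)) 1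
        = PySem.List.pyRange (i+1) ((i+1) + ((k : Nat) : Int)) 1 := by
      have : i + ((k+1 : Nat) : Int) = (i+1) + ((k : Nat) : Int) := by push_cast; ring
      rw [this]
    rw [hrange, ihk (i+1) (PySem.Int.floordiv inp 2)]
    -- arithmetic bridging
    have hmod : PySem.Int.mod inp 2 = inp % 2 := by
      rw [PySem.Int.mod, Int.fmod_eq_emod]; simp
    have hdiv : PySem.Int.floordiv inp 2 = inp / 2 := by
      rw [PySem.Int.floordiv, Int.fdiv_eq_ediv]; simp
    set r : Int := inp % (2^(k+1)) with hrdef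
    have hr0 : 0 ≤ r := Int.emod_nonneg inp (by positivity)
    have hrlt : r < 2^(k+1) := Int.emod_lt_of_pos inp (by positivity)
    have hdvd : (2:Int) ∣ 2^(k+1) := ⟨2^k, by ring⟩
    have hr2 : r % 2 = inp % 2 := Int.emod_emod_of_dvd inp hdvd
    -- the halved remainder
    have hhalf : (inp / 2) % (2^k) = r / 2 := by
      have hQ : inp = r + (2^k * (inp / (2^(k+1)))) * 2 := by
        have h := Int.ediv_add_emod inp (2^(k+1))
        rw [← hrdef] at h
        linear_combination -h
      have h2 : inp / 2 = r / 2 + 2^k * (inp / (2^(k+1))) := by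
        conv_lhs => rw [hQ]
        rw [Int.add_mul_ediv_right _ _ (by omega : (2:Int) ≠ 0)]
      rw [h2, Int.add_mul_emod_self_left]
      have hrlt2 : r < 2^k * 2 := by
        have hp : (2:Int)^(k+1) = 2^k * 2 := by ring
        rw [hp] at hrlt
        exact hrlt
      rw [Int.emod_eq_of_lt (by omega) (by omega)]
    have hn2 : ((inp / 2) % (2^k)).toNat = r.toNat / 2 := by
      rw [hhalf]; omega
    rw [hdiv, hn2]
    -- expand pvBitsOf of the full remainder
    rw [pvBitsOf_eq (r.toNat)]
    have hpar : (r.toNat % 2 = 1) ↔ (PySem.Int.mod inp 2 ≠ 0) := by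
      rw [hmod]; omega
    by_cases hodd : PySem.Int.mod inp 2 ≠ 0
    · rw [if_pos hodd, if_pos (hpar.mpr hodd)]
      simp only [List.map_append, List.map_cons, List.map_nil, List.map_map, List.append_assoc]
      congr 2
      · simp
      · apply List.map_congr_left
        intro j _
        simp only [Function.comp_apply]
        congr 1
        omega
    · rw [if_neg hodd, if_neg (fun h => hodd (hpar.mp h))]
      simp only [List.nil_append, List.map_map]
      congr 1
      apply List.map_congr_left
      intro j _
      simp only [Function.comp_apply]
      congr 1
      omega

-- ===== VERDICT (by name: the statement is the Claim_ definition above) =====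
theorem get_expected_multi_spec : Claim_equal_get_expected_multi := by
  intro w oc inp _ hpre
  unfold Pre_get_expected_multi at hpre
  unfold Spec_get_expected_multi get_expected_multi get_expected_multi_alt
  simp only []
  set K : Nat := w.toNat with hK
  have hw : w = ((K : Nat) : Int) := by omega
  have hrange : PySem.List.pyRange 0 w 1 = PySem.List.pyRange 0 ((0:Int) + (K : Nat)) 1 := by
    rw [hw]; norm_num
  rw [hrange, pvALoop K 0 inp []]
  rw [pv_band_mask inp K]
  have hr0 : 0 ≤ inp % (2^K) := Int.emod_nonneg inp (by positivity)
  set n : Nat := (inp % (2^K)).toNat with hn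
  have hcast : inp % (2^K) = ((n : Nat) : Int) := by omega
  rw [hcast]
  have hbin : (PySem.Int.pyBin ((n : Nat) : Int)).toList = '0' :: 'b' :: Nat.toDigits 2 n := by
    rw [PySem.Int.toList_pyBin, PySem.Int.toBinChars0b]
    rw [if_neg (by omega)]
    simp
  rw [hbin]
  rw [PySem.List.slice_from _ (by omega : (0:Int) ≤ 2)]
  show ([] : List (Option Int)) ++ _ = pvEF _ 0 ++ _
  rw [List.nil_append]
  have hdrop : List.drop ((2:Int)).toNat ('0' :: 'b' :: Nat.toDigits 2 n) = Nat.toDigits 2 n := rfl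
  rw [hdrop, pvEF_toDigits n]
  congr 1
  apply List.map_congr_left
  intro j _
  simp
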